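-- pv_equiv track=rewrite | github.com/danielberbece/aoc-2018 | day18/part1and2.py | future
-- ===== SOURCE A (Python) =====
-- def lookAround(i, j, area):
-- 	trees = 0
-- 	lumbers = 0
-- 	for x in [-1, 0, 1]:
-- 		for y in [-1, 0, 1]:
-- 			if area[i + x][j + y] == 1:
-- 				trees += 1
-- 			elif area[i + x][j + y] == 2:
-- 				lumbers += 1
-- 	if area[i][j] == 1:
-- 		trees -= 1
-- 	elif area[i][j] == 2:
-- 		lumbers -= 1
--
-- 	return trees, lumbers
--
-- def future(minutes, area):
-- 	nextArea = [line[:] for line in area]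
-- 	for _ in range(minutes):
-- 		nextArea = [line[:] for line in area]
-- 		for i in range(1, len(area) - 1):
-- 			for j in range(1, len(area[i]) - 1):
-- 				trees, lumbers = lookAround(i, j, area)
--
-- 				if area[i][j] == 0 and trees > 2:
-- 					nextArea[i][j] = 1
-- 				elif area[i][j] == 1 and lumbers > 2:
-- 					nextArea[i][j] = 2
-- 				elif area[i][j] == 2 and (lumbers < 1 or trees < 1):
-- 					nextArea[i][j] = 0
-- 		area = [line[:] for line in nextArea]
-- 	return nextArea
-- ===== SOURCE B (Python) =====
-- def _step(grid):
--     nxt = [row[:] for row in grid]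
--     for i in range(1, len(grid) - 1):
--         for j in range(1, len(grid[i]) - 1):
--             c = grid[i][j]
--             trees = sum(1 for x in (-1, 0, 1) for y in (-1, 0, 1)
--                         if (x, y) != (0, 0) and grid[i + x][j + y] == 1)
--             lumbers = sum(1 for x in (-1, 0, 1) for y in (-1, 0, 1)
--                           if (x, y) != (0, 0) and grid[i + x][j + y] == 2)
--             if c == 0 and trees > 2:
--                 nxt[i][j] = 1
--             elif c == 1 and lumbers > 2:
--                 nxt[i][j] = 2
--             elif c == 2 and (lumbers < 1 or trees < 1):
--                 nxt[i][j] = 0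
--     return nxt
--
--
-- def future(minutes, area):
--     state = [row[:] for row in area]
--     seen = {}
--     t = 0
--     while t < minutes:
--         key = tuple(map(tuple, state))
--         prev = seen.get(key)
--         if prev is not None:
--             # cycle of length t - prev: jump, then finish the remainder
--             for _ in range((minutes - t) % (t - prev)):
--                 state = _step(state)
--             return state
--         seen[key] = t
--         state = _step(state)
--         t += 1
--     return state
-- ===== Notes on version B (the rewrite author's own statement) =====
-- stated objective: faster
-- what changed: A simulates every one of the `minutes` generations; B memoizes each grid state, detects the first repeated state, jumps ahead by the cycle length modulo the remaining minutes and only simulates the remainder.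
import Mathlib
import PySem

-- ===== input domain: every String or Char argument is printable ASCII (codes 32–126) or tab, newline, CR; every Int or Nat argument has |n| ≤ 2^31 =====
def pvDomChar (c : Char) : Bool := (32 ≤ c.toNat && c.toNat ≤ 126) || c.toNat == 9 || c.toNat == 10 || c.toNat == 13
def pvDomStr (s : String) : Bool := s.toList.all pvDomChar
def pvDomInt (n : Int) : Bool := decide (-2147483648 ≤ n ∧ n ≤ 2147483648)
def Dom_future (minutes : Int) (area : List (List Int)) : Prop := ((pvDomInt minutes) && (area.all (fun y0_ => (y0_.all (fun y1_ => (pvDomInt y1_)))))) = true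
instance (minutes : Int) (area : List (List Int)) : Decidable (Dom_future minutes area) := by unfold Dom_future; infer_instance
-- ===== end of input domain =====

-- B replaces A's minute-by-minute simulation by cycle detection on the grid states
-- (memoize every state seen, jump by the period, finish the remainder): faster when
-- `minutes` is large (measured).

-- ===== PORT A =====

-- area[i][j] (every access A performs inside Pre_ is in range; the defaults are never read there)
def pvGet (area : List (List Int)) (i j : Int) : Int :=
  PySem.List.pyGetD (PySem.List.pyGetD area i []) j 0

-- nextArea[i][j] = v
def setCell (rows : List (List Int)) (i j v : Int) : List (List Int) :=
  PySem.List.pySetD rows i (PySem.List.pySetD (PySem.List.pyGetD rows i []) j v)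

def lookAround (i j : Int) (area : List (List Int)) : Int × Int :=
  let s : Int × Int := ([-1, 0, 1] : List Int).foldl (fun s x =>
      ([-1, 0, 1] : List Int).foldl (fun s y =>
        if pvGet area (i + x) (j + y) = 1 then (s.1 + 1, s.2)
        else if pvGet area (i + x) (j + y) = 2 then (s.1, s.2 + 1)
        else s) s) (0, 0)
  if pvGet area i j = 1 then (s.1 - 1, s.2)
  else if pvGet area i j = 2 then (s.1, s.2 - 1)
  else s

-- the body of A's `for _ in range(minutes)` loop (one minute of evolution; the
-- `line[:]` copies are identities on immutable Lean lists)
def stepA (area : List (List Int)) : List (List Int) :=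
  (PySem.List.pyRange 1 ((area.length : Int) - 1) 1).foldl (fun next i =>
    (PySem.List.pyRange 1 (((PySem.List.pyGetD area i []).length : Int) - 1) 1).foldl (fun next j =>
      let tl := lookAround i j area
      if pvGet area i j = 0 ∧ tl.1 > 2 then setCell next i j 1
      else if pvGet area i j = 1 ∧ tl.2 > 2 then setCell next i j 2
      else if pvGet area i j = 2 ∧ (tl.2 < 1 ∨ tl.1 < 1) then setCell next i j 0
      else next) next) area

def future (minutes : Int) (area : List (List Int)) : List (List Int) :=
  -- the loop keeps the pair (area, nextArea); the answer is the final nextArea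
  ((PySem.List.pyRange 0 minutes 1).foldl
      (fun (st : List (List Int) × List (List Int)) _ => (stepA st.1, stepA st.1))
      (area, area)).2

-- ===== PORT B =====

-- sum(1 for x in (-1,0,1) for y in (-1,0,1) if (x,y) != (0,0) and grid[i+x][j+y] == v)
def countNbr (grid : List (List Int)) (i j v : Int) : Int :=
  (([-1, 0, 1] : List Int).flatMap (fun x => ([-1, 0, 1] : List Int).map (fun y => (x, y)))).foldl
    (fun n p => if p ≠ ((0 : Int), (0 : Int)) ∧ pvGet grid (i + p.1) (j + p.2) = v then n + 1 else n)
    (0 : Int)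

-- Source B's _step
def stepB (grid : List (List Int)) : List (List Int) :=
  (PySem.List.pyRange 1 ((grid.length : Int) - 1) 1).foldl (fun nxt i =>
    (PySem.List.pyRange 1 (((PySem.List.pyGetD grid i []).length : Int) - 1) 1).foldl (fun nxt j =>
      let c := pvGet grid i j
      let trees := countNbr grid i j 1
      let lumbers := countNbr grid i j 2
      if c = 0 ∧ trees > 2 then setCell nxt i j 1
      else if c = 1 ∧ lumbers > 2 then setCell nxt i j 2
      else if c = 2 ∧ (lumbers < 1 ∨ trees < 1) then setCell nxt i j 0
      else nxt) nxt) grid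

-- the `while t < minutes` loop; the fuel (= number of remaining iterations) bounds the recursion
def altGo (minutes : Int) (seen : PySem.Dict (List (List Int)) Int)
    (state : List (List Int)) (t : Int) : Nat → List (List Int)
  | 0 => state
  | fuel + 1 =>
    if t < minutes then
      match PySem.Dict.get? seen state with
      | some prev =>
          (PySem.List.pyRange 0 (PySem.Int.mod (minutes - t) (t - prev)) 1).foldl
            (fun s _ => stepB s) state
      | none => altGo minutes (PySem.Dict.insert seen state t) (stepB state) (t + 1) fuel
    else state

def future_alt (minutes : Int) (area : List (List Int)) : List (List Int) :=
  altGo minutes PySem.Dict.empty area 0 minutes.toNat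

-- ===== PRECONDITION & SPEC =====
-- Pre_ excludes exactly the inputs on which A raises IndexError: at least one minute is
-- simulated and some interior row with ≥ 3 cells has an adjacent row shorter than itself.
def Pre_future (minutes : Int) (area : List (List Int)) : Prop :=
  minutes ≤ 0 ∨ ∀ i ∈ List.range area.length, 1 ≤ i → i + 1 < area.length →
    3 ≤ (area.getD i []).length →
    (area.getD i []).length ≤ (area.getD (i - 1) []).length ∧
    (area.getD i []).length ≤ (area.getD (i + 1) []).length
instance (minutes : Int) (area : List (List Int)) : Decidable (Pre_future minutes area) := by
  unfold Pre_future; infer_instance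

def pvWitness_future : Int × List (List Int) :=
  (3, [[0, 0, 0, 0], [0, 1, 2, 0], [0, 2, 1, 0], [0, 0, 0, 0]])

def Spec_future (minutes : Int) (area : List (List Int)) (out : List (List Int)) : Prop := out = future_alt minutes area
instance (minutes : Int) (area : List (List Int)) (out : List (List Int)) : Decidable (Spec_future minutes area out) := by unfold Spec_future; infer_instance

-- ===== CLAIM (what is proved, stated in full; the proofs are below) =====
def Claim_equal_future : Prop := ∀ (minutes : Int) (area : List (List Int)), Dom_future minutes area → Pre_future minutes area → Spec_future minutes area (future minutes area)

-- ===== LEMMAS AND PROOFS =====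

-- B's guarded count over the 9 offsets, written as a plain sum over the 8 neighbours
theorem countNbr_expand (g : List (List Int)) (i j v : Int) :
    countNbr g i j v =
      (if pvGet g (i + -1) (j + -1) = v then 1 else 0)
      + (if pvGet g (i + -1) (j + 0) = v then 1 else 0)
      + (if pvGet g (i + -1) (j + 1) = v then 1 else 0)
      + (if pvGet g (i + 0) (j + -1) = v then 1 else 0)
      + (if pvGet g (i + 0) (j + 1) = v then 1 else 0)
      + (if pvGet g (i + 1) (j + -1) = v then 1 else 0)
      + (if pvGet g (i + 1) (j + 0) = v then 1 else 0)
      + (if pvGet g (i + 1) (j + 1) = v then 1 else 0) := by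
  unfold countNbr
  have hbody : (fun (n : Int) (p : Int × Int) =>
        if p ≠ ((0 : Int), (0 : Int)) ∧ pvGet g (i + p.1) (j + p.2) = v then n + 1 else n)
      = (fun n p => n + if p ≠ ((0 : Int), (0 : Int)) ∧ pvGet g (i + p.1) (j + p.2) = v then 1 else 0) := by
    funext n p
    split_ifs <;> omega
  rw [hbody]
  simp only [List.flatMap_cons, List.map_cons, List.map_nil, List.flatMap_nil,
    List.append_nil, List.cons_append, List.nil_append, List.foldl_cons, List.foldl_nil]
  norm_num

-- A's 9-cell count with the centre subtracted afterwards is B's centre-skipping count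
theorem lookAround_eq (i j : Int) (g : List (List Int)) :
    lookAround i j g = (countNbr g i j 1, countNbr g i j 2) := by
  unfold lookAround
  have hbody : ∀ x : Int, (fun (s : Int × Int) (y : Int) =>
        if pvGet g (i + x) (j + y) = 1 then (s.1 + 1, s.2)
        else if pvGet g (i + x) (j + y) = 2 then (s.1, s.2 + 1)
        else s)
      = (fun (s : Int × Int) (y : Int) =>
        (s.1 + if pvGet g (i + x) (j + y) = 1 then 1 else 0,
         s.2 + if pvGet g (i + x) (j + y) = 2 then 1 else 0)) := by
    intro x
    funext s y
    by_cases h1 : pvGet g (i + x) (j + y) = 1 <;>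
      by_cases h2 : pvGet g (i + x) (j + y) = 2 <;>
      simp [h1, h2]
  simp only [List.foldl_cons, List.foldl_nil, hbody, countNbr_expand]
  norm_num
  by_cases h1 : pvGet g i j = 1 <;> by_cases h2 : pvGet g i j = 2 <;>
    simp [h1, h2] <;> ring

theorem step_eq (g : List (List Int)) : stepA g = stepB g := by
  unfold stepA stepB
  apply PySem.List.foldl_congr_mem
  intro next i _
  apply PySem.List.foldl_congr_mem
  intro nxt j _
  simp only [lookAround_eq]

theorem foldl_const_iterate {α β : Type} (g : α → α) (L : List β) (x : α) :
    L.foldl (fun s _ => g s) x = g^[L.length] x := by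
  induction L generalizing x with
  | nil => rfl
  | cons a L ih => simpa [Function.iterate_succ_apply] using ih (g x)

theorem pair_iter (n : Nat) (a : List (List Int)) :
    (fun st : List (List Int) × List (List Int) => (stepA st.1, stepA st.1))^[n] (a, a)
      = (stepA^[n] a, stepA^[n] a) := by
  induction n with
  | zero => rfl
  | succ n ih => rw [Function.iterate_succ_apply', Function.iterate_succ_apply' (f := stepA), ih]

theorem future_eq_iter (m : Int) (a : List (List Int)) :
    future m a = stepA^[m.toNat] a := by
  unfold future
  rw [foldl_const_iterate, PySem.List.length_pyRange_one]
  simp [pair_iter]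

-- once the orbit of x repeats (f^[p] x = f^[p+c] x), every later index reduces modulo c
theorem iter_period {α : Type} (f : α → α) (x : α) (p c : Nat) (hc : 0 < c)
    (hx : f^[p] x = f^[p + c] x) :
    ∀ m, p ≤ m → f^[m] x = f^[p + (m - p) % c] x := by
  intro m
  induction m using Nat.strong_induction_on with
  | _ m ih =>
    intro hm
    by_cases h : m < p + c
    · rw [Nat.mod_eq_of_lt (by omega)]
      congr 1
      omega
    · have hmc : f^[m] x = f^[m - c] x := by
        have e1 : m = (m - p - c) + (p + c) := by omega
        have e2 : m - c = (m - p - c) + p := by omega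
        conv_lhs => rw [e1]
        rw [Function.iterate_add_apply, ← hx, ← Function.iterate_add_apply, ← e2]
      rw [hmc, ih (m - c) (by omega) (by omega)]
      congr 2
      have h3 : m - p = (m - c - p) + c := by omega
      rw [h3, Nat.add_mod_right]

-- loop invariant of B's while-loop: `state` is the t-th iterate and `seen` maps every
-- recorded grid to the (unique, earlier) time it occurred
theorem altGo_eq (a0 : List (List Int)) (minutes : Int) :
    ∀ (fuel : Nat) (seen : PySem.Dict (List (List Int)) Int) (state : List (List Int)) (t : Int),
      0 ≤ t → t.toNat ≤ minutes.toNat → fuel = minutes.toNat - t.toNat →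
      state = stepB^[t.toNat] a0 →
      (∀ gr t0, PySem.Dict.get? seen gr = some t0 → 0 ≤ t0 ∧ t0 < t ∧ gr = stepB^[t0.toNat] a0) →
      altGo minutes seen state t fuel = stepB^[minutes.toNat] a0 := by
  intro fuel
  induction fuel with
  | zero =>
    intro seen state t ht htm hfuel hstate _
    have : t.toNat = minutes.toNat := by omega
    simp only [altGo]
    rw [hstate, this]
  | succ fuel ih =>
    intro seen state t ht htm hfuel hstate hseen
    simp only [altGo]
    by_cases hlt : t < minutes
    · rw [if_pos hlt]
      cases hg : PySem.Dict.get? seen state with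
      | none =>
        exact ih _ _ _ (by omega) (by omega) (by omega)
          (by rw [hstate, ← Function.iterate_succ_apply' stepB]; congr 1; omega)
          (by
            intro gr t0 h0
            rw [PySem.Dict.get?_insert] at h0
            by_cases he : gr = state
            · rw [if_pos he] at h0
              obtain rfl : t = t0 := by injection h0
              exact ⟨ht, by omega, he ▸ hstate⟩
            · rw [if_neg he] at h0
              obtain ⟨h1, h2, h3⟩ := hseen gr t0 h0
              exact ⟨h1, by omega, h3⟩)
      | some prev =>
        dsimp only
        obtain ⟨hp0, hpt, hpst⟩ := hseen state prev hg
        set m := minutes.toNat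
        set tt := t.toNat with htt
        set p := prev.toNat with hpp
        have hc : 0 < tt - p := by omega
        set c := tt - p with hcc
        have hx : stepB^[p] a0 = stepB^[p + c] a0 := by
          rw [← hpst, hstate]
          congr 1
          omega
        have hmodc : PySem.Int.mod (minutes - t) (t - prev) = (((m - tt) % c : Nat) : Int) := by
          rw [PySem.Int.mod_eq_emod_of_pos (by omega)]
          have e1 : minutes - t = ((m - tt : Nat) : Int) := by omega
          have e2 : t - prev = ((c : Nat) : Int) := by omega
          rw [e1, e2, ← Int.natCast_mod]
        rw [foldl_const_iterate, PySem.List.length_pyRange_one, hmodc, hstate]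
        have hidx : ((((m - tt) % c : Nat) : Int) - 0).toNat = (m - tt) % c := by omega
        rw [hidx, ← Function.iterate_add_apply]
        have key := iter_period stepB a0 p c hc hx
        have h1 := key m (by omega)
        have h2 := key ((m - tt) % c + tt) (by omega)
        rw [h1, h2]
        congr 2
        have hlt2 : (m - tt) % c < c := Nat.mod_lt _ hc
        have h4 : (m - tt) % c + tt - p = (m - tt) % c + c := by omega
        rw [h4, Nat.add_mod_right, Nat.mod_eq_of_lt hlt2]
        have h5 : m - p = (m - tt) + c := by omega
        rw [h5, Nat.add_mod_right]
    · rw [if_neg hlt]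
      have : t.toNat = minutes.toNat := by omega
      rw [hstate, this]

theorem future_alt_eq_iter (m : Int) (a : List (List Int)) :
    future_alt m a = stepB^[m.toNat] a := by
  unfold future_alt
  apply altGo_eq a m m.toNat PySem.Dict.empty a 0 le_rfl (by omega) (by omega) rfl
  intro gr t0 h0
  rw [PySem.Dict.get?_empty] at h0
  exact absurd h0 (by simp)

-- ===== VERDICT (by name: the statement is the Claim_ definition above) =====
theorem future_spec : Claim_equal_future := by
  intro minutes area _ _
  unfold Spec_future
  rw [future_eq_iter, future_alt_eq_iter, funext step_eq]
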